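-- pv_equiv track=rewrite | github.com/ivana0920/algoritmi_u_bioinf | BA4H.py | SpectralConvolution
-- ===== SOURCE A (Python) =====
-- def SpectralConvolution(spectrum):
--   rez=list()
--   for x in spectrum:
--     for y in spectrum:
--       if int(x)>int(y):
--         rez.append(int(x)-int(y))
--   rez2=[str(x) for x in rez]
--   return sorted(rez2)
-- ===== SOURCE B (Python) =====
-- def SpectralConvolution(spectrum):
--     counts = {}
--     for x in spectrum:
--         v = int(x)
--         counts[v] = counts.get(v, 0) + 1
--     rez = []
--     for v1, c1 in counts.items():
--         for v2, c2 in counts.items():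
--             if v1 > v2:
--                 rez += [str(v1 - v2)] * (c1 * c2)
--     return sorted(rez)
-- ===== Notes on version B (the rewrite author's own statement) =====
-- stated objective: alternative
-- what changed: B builds a frequency table of the values once and emits each positive difference of DISTINCT values v1>v2 exactly count[v1]*count[v2] times via list repetition, replacing A's element-by-element nested scan over the whole spectrum; the final lexicographic string sort is kept.
import Mathlib
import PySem

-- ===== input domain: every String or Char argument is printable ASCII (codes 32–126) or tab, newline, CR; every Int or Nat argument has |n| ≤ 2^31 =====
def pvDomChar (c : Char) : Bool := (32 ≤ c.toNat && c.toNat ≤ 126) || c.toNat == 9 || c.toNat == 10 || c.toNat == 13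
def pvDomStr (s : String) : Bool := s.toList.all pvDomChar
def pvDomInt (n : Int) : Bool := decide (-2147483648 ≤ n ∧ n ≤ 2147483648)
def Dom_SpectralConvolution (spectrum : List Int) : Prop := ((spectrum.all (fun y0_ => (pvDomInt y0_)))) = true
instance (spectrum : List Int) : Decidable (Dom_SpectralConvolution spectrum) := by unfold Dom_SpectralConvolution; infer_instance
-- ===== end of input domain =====

-- B replaces A's element-by-element nested scan with a frequency table over distinct
-- values, emitting each difference count[v1]*count[v2] times (objective: alternative).

-- ===== PORT A =====
def SpectralConvolution (spectrum : List Int) : List String :=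
  let rez : List Int :=
    spectrum.foldl (fun acc x =>
      spectrum.foldl (fun acc2 y =>
        if x > y then acc2 ++ [x - y] else acc2) acc) []
  let rez2 : List String := rez.map (fun x => PySem.Int.toStr x)
  PySem.List.sorted rez2 (fun s => s) false

-- ===== PORT B =====
def SpectralConvolution_alt (spectrum : List Int) : List String :=
  let counts : PySem.Dict Int Int :=
    spectrum.foldl (fun d x => d.insert x (d.getD x 0 + 1)) PySem.Dict.empty
  let rez : List String :=
    counts.items.foldl (fun acc p1 =>
      counts.items.foldl (fun acc2 p2 =>
        if p1.1 > p2.1 then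
          acc2 ++ PySem.List.pyRepeat [PySem.Int.toStr (p1.1 - p2.1)] (p1.2 * p2.2)
        else acc2) acc) []
  PySem.List.sorted rez (fun s => s) false

-- ===== PRECONDITION & SPEC =====
def Spec_SpectralConvolution (spectrum : List Int) (out : List String) : Prop := out = SpectralConvolution_alt spectrum
instance (spectrum : List Int) (out : List String) : Decidable (Spec_SpectralConvolution spectrum out) := by unfold Spec_SpectralConvolution; infer_instance

-- ===== CLAIM (what is proved, stated in full; the proofs are below) =====
def Claim_equal_SpectralConvolution : Prop := ∀ (spectrum : List Int), Dom_SpectralConvolution spectrum → Spec_SpectralConvolution spectrum (SpectralConvolution spectrum)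

-- ===== LEMMAS AND PROOFS =====

-- 'rez += g(x) if p x' loop shape
theorem foldl_append_ite {α β : Type} (p : α → Prop) [DecidablePred p] (g : α → List β)
    (l : List α) (acc : List β) :
    l.foldl (fun acc x => if p x then acc ++ g x else acc) acc
      = acc ++ l.flatMap (fun x => if p x then g x else []) := by
  induction l generalizing acc with
  | nil => simp
  | cons a t ih => by_cases h : p a <;> simp [h, ih]

theorem flatten_replicate_append_perm {α : Type} (n : Nat) (a b : List α) :
    (List.replicate n (a ++ b)).flatten.Perm
      ((List.replicate n a).flatten ++ (List.replicate n b).flatten) := by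
  induction n with
  | zero => simp
  | succ n ih =>
    simp only [List.replicate_succ, List.flatten_cons]
    refine (ih.append_left (a ++ b)).trans ?_
    set A := (List.replicate n a).flatten
    set B := (List.replicate n b).flatten
    have h2 : ((b ++ A) ++ B).Perm ((A ++ b) ++ B) := List.perm_append_comm.append_right B
    have step : (a ++ ((b ++ A) ++ B)).Perm (a ++ ((A ++ b) ++ B)) := h2.append_left a
    have e1 : (a ++ b) ++ (A ++ B) = a ++ ((b ++ A) ++ B) := by simp [List.append_assoc]
    have e2 : a ++ ((A ++ b) ++ B) = (a ++ A) ++ (b ++ B) := by simp [List.append_assoc]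
    rw [e1, ← e2]
    exact step

theorem flatten_replicate_perm_of_perm {α : Type} (n : Nat) {a b : List α} (h : a.Perm b) :
    (List.replicate n a).flatten.Perm (List.replicate n b).flatten := by
  induction n with
  | zero => simp
  | succ n ih => simpa [List.replicate_succ] using h.append ih

theorem flatten_replicate_flatMap_perm {α β : Type} (n : Nat) (D : List α) (g : α → List β) :
    (List.replicate n (D.flatMap g)).flatten.Perm
      (D.flatMap (fun v => (List.replicate n (g v)).flatten)) := by
  induction D with
  | nil => simp
  | cons d t ih =>
    simp only [List.flatMap_cons]
    exact (flatten_replicate_append_perm n (g d) (t.flatMap g)).trans (ih.append_left _)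

-- sum over a list that is zero except possibly at w
theorem sum_map_single {α : Type} [DecidableEq α] (l : List α) (f : α → Nat) (w : α)
    (hl : l.Nodup) (h0 : ∀ v, v ≠ w → f v = 0) :
    (l.map f).sum = if w ∈ l then f w else 0 := by
  induction l with
  | nil => simp
  | cons a t ih =>
    simp only [List.nodup_cons] at hl
    rcases hl with ⟨ha, ht⟩
    by_cases haw : a = w
    · subst haw
      simp [ih ht, ha]
    · have hwa : ¬ w = a := fun h => haw h.symm
      simp [h0 a haw, ih ht, hwa]

-- the counter expansion: a list is a permutation of its distinct values, each
-- repeated with its multiplicity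
theorem perm_flatMap_replicate_count (xs : List Int) :
    xs.Perm ((PySem.Set.ofList xs).flatMap (fun v => List.replicate (xs.count v) v)) := by
  rw [List.perm_iff_count]
  intro w
  rw [List.count_flatMap]
  simp only [Function.comp_def]
  rw [sum_map_single (PySem.Set.ofList xs)
      (fun v => List.count w (List.replicate (xs.count v) v)) w
      (PySem.Set.nodup_ofList xs)
      (by intro v hv; simp [List.count_replicate, hv])]
  by_cases hw : w ∈ xs
  · simp [PySem.Set.mem_ofList, hw]
  · simp [PySem.Set.mem_ofList, hw, List.count_eq_zero_of_not_mem hw]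

-- the two unsorted difference lists are permutations of each other
theorem diff_lists_perm (spectrum : List Int) :
    (spectrum.flatMap (fun x => spectrum.flatMap (fun y =>
        if x > y then [PySem.Int.toStr (x - y)] else []))).Perm
      ((PySem.Set.ofList spectrum).flatMap (fun v1 => (PySem.Set.ofList spectrum).flatMap (fun v2 =>
        if v1 > v2 then
          List.replicate (spectrum.count v1 * spectrum.count v2) (PySem.Int.toStr (v1 - v2))
        else []))) := by
  have e := perm_flatMap_replicate_count spectrum
  -- abbreviations (plain lets would not survive `rw`, so spell things out)
  -- inner loop expansion, for any fixed x
  have inner : ∀ x : Int, (spectrum.flatMap (fun y => if x > y then [PySem.Int.toStr (x - y)] else [])).Perm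
      ((PySem.Set.ofList spectrum).flatMap (fun v2 =>
        (List.replicate (spectrum.count v2) (if x > v2 then [PySem.Int.toStr (x - v2)] else [])).flatten)) := by
    intro x
    have s1 := e.flatMap (f := fun y => if x > y then [PySem.Int.toStr (x - y)] else [])
      (g := fun y => if x > y then [PySem.Int.toStr (x - y)] else []) (fun _ _ => List.Perm.refl _)
    refine s1.trans ?_
    rw [List.flatMap_assoc]
    simp [List.flatMap_replicate]
  -- outer loop expansion
  have s1 := e.flatMap
    (f := fun x => spectrum.flatMap (fun y => if x > y then [PySem.Int.toStr (x - y)] else []))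
    (g := fun x => spectrum.flatMap (fun y => if x > y then [PySem.Int.toStr (x - y)] else []))
    (fun _ _ => List.Perm.refl _)
  refine s1.trans ?_
  rw [List.flatMap_assoc]
  simp only [List.flatMap_replicate]
  have s2 : ((PySem.Set.ofList spectrum).flatMap (fun v1 =>
      (List.replicate (spectrum.count v1)
        (spectrum.flatMap (fun y => if v1 > y then [PySem.Int.toStr (v1 - y)] else []))).flatten)).Perm
      ((PySem.Set.ofList spectrum).flatMap (fun v1 =>
        (List.replicate (spectrum.count v1)
          ((PySem.Set.ofList spectrum).flatMap (fun v2 =>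
            (List.replicate (spectrum.count v2)
              (if v1 > v2 then [PySem.Int.toStr (v1 - v2)] else [])).flatten))).flatten)) :=
    (List.Perm.refl _).flatMap (fun v1 _ => flatten_replicate_perm_of_perm _ (inner v1))
  refine s2.trans ?_
  have s3 : ((PySem.Set.ofList spectrum).flatMap (fun v1 =>
      (List.replicate (spectrum.count v1)
        ((PySem.Set.ofList spectrum).flatMap (fun v2 =>
          (List.replicate (spectrum.count v2)
            (if v1 > v2 then [PySem.Int.toStr (v1 - v2)] else [])).flatten))).flatten)).Perm
      ((PySem.Set.ofList spectrum).flatMap (fun v1 =>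
        (PySem.Set.ofList spectrum).flatMap (fun v2 =>
          (List.replicate (spectrum.count v1)
            ((List.replicate (spectrum.count v2)
              (if v1 > v2 then [PySem.Int.toStr (v1 - v2)] else [])).flatten)).flatten))) :=
    (List.Perm.refl _).flatMap (fun v1 _ => flatten_replicate_flatMap_perm _ _ _)
  refine s3.trans (List.Perm.of_eq ?_)
  refine List.flatMap_congr (fun v1 _ => List.flatMap_congr (fun v2 _ => ?_))
  by_cases hv : v1 > v2
  · simp [hv]
  · simp [hv]

-- A's unsorted list in flatMap form
theorem A_rez_eq (spectrum : List Int) :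
    spectrum.foldl (fun acc x =>
      spectrum.foldl (fun acc2 y => if x > y then acc2 ++ [x - y] else acc2) acc) []
      = spectrum.flatMap (fun x => spectrum.flatMap (fun y => if x > y then [x - y] else [])) := by
  have inner : ∀ (x : Int) (acc : List Int),
      spectrum.foldl (fun acc2 y => if x > y then acc2 ++ [x - y] else acc2) acc
        = acc ++ spectrum.flatMap (fun y => if x > y then [x - y] else []) := by
    intro x acc
    exact foldl_append_ite (fun y => x > y) (fun y => [x - y]) spectrum acc
  calc spectrum.foldl (fun acc x =>
        spectrum.foldl (fun acc2 y => if x > y then acc2 ++ [x - y] else acc2) acc) []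
      = spectrum.foldl (fun acc x =>
          acc ++ spectrum.flatMap (fun y => if x > y then [x - y] else [])) [] := by
        simp only [inner]
    _ = spectrum.flatMap (fun x => spectrum.flatMap (fun y => if x > y then [x - y] else [])) := by
        simpa using PySem.List.foldl_append_eq_flatMap
          (fun x => spectrum.flatMap (fun y => if x > y then [x - y] else [])) spectrum []

-- B's unsorted list in flatMap form over the distinct values
theorem B_rez_eq (spectrum : List Int) :
    (let counts : PySem.Dict Int Int :=
        spectrum.foldl (fun d x => d.insert x (d.getD x 0 + 1)) PySem.Dict.empty
     counts.items.foldl (fun acc p1 =>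
        counts.items.foldl (fun acc2 p2 =>
          if p1.1 > p2.1 then
            acc2 ++ PySem.List.pyRepeat [PySem.Int.toStr (p1.1 - p2.1)] (p1.2 * p2.2)
          else acc2) acc) [])
      = (PySem.Set.ofList spectrum).flatMap (fun v1 => (PySem.Set.ofList spectrum).flatMap (fun v2 =>
          if v1 > v2 then
            List.replicate (spectrum.count v1 * spectrum.count v2) (PySem.Int.toStr (v1 - v2))
          else [])) := by
  simp only [PySem.Dict.foldl_insert_getD_add_one_eq_counter, PySem.Dict.items_counter]
  have inner : ∀ (p1 : Int × Int) (acc : List String) (items : List (Int × Int)),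
      items.foldl (fun acc2 p2 =>
        if p1.1 > p2.1 then
          acc2 ++ PySem.List.pyRepeat [PySem.Int.toStr (p1.1 - p2.1)] (p1.2 * p2.2)
        else acc2) acc
      = acc ++ items.flatMap (fun p2 =>
          if p1.1 > p2.1 then
            PySem.List.pyRepeat [PySem.Int.toStr (p1.1 - p2.1)] (p1.2 * p2.2)
          else []) := by
    intro p1 acc items
    exact foldl_append_ite (fun p2 => p1.1 > p2.1)
      (fun p2 => PySem.List.pyRepeat [PySem.Int.toStr (p1.1 - p2.1)] (p1.2 * p2.2)) items acc
  simp only [inner]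
  have outer := PySem.List.foldl_append_eq_flatMap
    (fun (p1 : Int × Int) =>
      (List.map (fun k => (k, (List.count k spectrum : Int))) (PySem.Set.ofList spectrum)).flatMap
        (fun p2 => if p1.1 > p2.1 then
            PySem.List.pyRepeat [PySem.Int.toStr (p1.1 - p2.1)] (p1.2 * p2.2) else []))
    (List.map (fun k => (k, (List.count k spectrum : Int))) (PySem.Set.ofList spectrum))
    ([] : List String)
  refine Eq.trans outer ?_
  simp only [List.nil_append, List.flatMap_map, PySem.List.pyRepeat_singleton]
  refine List.flatMap_congr (fun v1 _ => ?_)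
  refine List.flatMap_congr (fun v2 _ => ?_)
  by_cases hv : v1 > v2
  · simp only [hv, if_pos]
    have : ((List.count v1 spectrum : Int) * (List.count v2 spectrum : Int)).toNat
        = List.count v1 spectrum * List.count v2 spectrum := by
      rw [← Nat.cast_mul]
      exact Int.toNat_natCast _
    simp [this]
  · simp [hv]

-- ===== VERDICT (by name: the statement is the Claim_ definition above) =====
theorem SpectralConvolution_spec : Claim_equal_SpectralConvolution := by
  intro spectrum _
  unfold Spec_SpectralConvolution SpectralConvolution SpectralConvolution_alt
  simp only [A_rez_eq]
  rw [B_rez_eq spectrum]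
  rw [PySem.List.sorted_id_eq_sorted_id_iff_perm]
  have hmap : (spectrum.flatMap (fun x => spectrum.flatMap (fun y => if x > y then [x - y] else []))).map
        (fun x => PySem.Int.toStr x)
      = spectrum.flatMap (fun x => spectrum.flatMap (fun y =>
          if x > y then [PySem.Int.toStr (x - y)] else [])) := by
    simp [List.map_flatMap, apply_ite (List.map (fun x => PySem.Int.toStr x))]
  rw [hmap]
  exact diff_lists_perm spectrum
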